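-- pv_equiv track=rewrite | github.com/odsod/machine | recorder/src/recorder/meet.py | _filter_participants
-- ===== SOURCE A (Python) =====
-- _KNOWN_UI = frozenset({
--     "PM", "AM", "New",
--     "Take notes with Gemini", "Ask Gemini",
-- })
--
-- def _filter_participants(texts: list[str], meeting_title: str | None) -> list[str]:
--     """Filter static text nodes to likely participant names."""
--     seen = set()
--     candidates = []
--     for text in texts:
--         if text in seen:
--             continue
--         if not _looks_like_name(text, meeting_title):
--             continue
--         seen.add(text)
--         candidates.append(text)
--
--     # Deduplicate: if "Name foo" starts with "Name", keep only "Name"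
--     participants = []
--     for c in candidates:
--         if any(c != other and c.startswith(other) for other in candidates):
--             continue
--         participants.append(c)
--     return participants
--
-- def _looks_like_name(text: str, meeting_title: str | None) -> bool:
--     if not text or len(text) < 2 or len(text) > 80:
--         return False
--     if meeting_title and text == meeting_title:
--         return False
--     if text in _KNOWN_UI:
--         return False
--     if text.isdigit():
--         return False
--     if ":" in text and len(text) <= 8:
--         return False
--     if not any(c.isalpha() for c in text):
--         return False
--     if not text[0].isupper():
--         return False
--     if len(text) > 50:
--         return False
--     return True
-- ===== SOURCE B (Python) =====
-- _KNOWN_UI = frozenset({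
--     "PM", "AM", "New",
--     "Take notes with Gemini", "Ask Gemini",
-- })
--
-- def _is_name(t, title):
--     # single boolean expression equivalent to A's early-return chain
--     return (2 <= len(t) <= 50
--             and not (title and t == title)
--             and t not in _KNOWN_UI
--             and not t.isdigit()
--             and not (":" in t and len(t) <= 8)
--             and any(c.isalpha() for c in t)
--             and t[0].isupper())
--
-- def _filter_participants(texts: list[str], meeting_title: str | None) -> list[str]:
--     """Filter static text nodes to likely participant names."""
--     # phase 1: one pass, dedup by membership in the output list itself
--     candidates = []
--     for t in texts:
--         if _is_name(t, meeting_title) and t not in candidates: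
--             candidates.append(t)
--     # phase 2: shortest-first accumulation of minimal (prefix-free) names
--     minimal = []
--     for c in sorted(candidates, key=len):
--         if all(not c.startswith(m) or m == c for m in minimal):
--             minimal.append(c)
--     ms = set(minimal)
--     return [c for c in candidates if c in ms]
-- ===== Notes on version B (the rewrite author's own statement) =====
-- stated objective: alternative
-- what changed: Phase 1 becomes a single pass that tests the name predicate (rewritten as one boolean conjunction) and dedups by membership in the output list itself instead of a separate seen-set; phase 2 no longer rescans the full candidate list per candidate but sorts by length and makes one accumulating pass keeping only minimal prefix-free names, then emits by filtering the original candidate order.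
import Mathlib
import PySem

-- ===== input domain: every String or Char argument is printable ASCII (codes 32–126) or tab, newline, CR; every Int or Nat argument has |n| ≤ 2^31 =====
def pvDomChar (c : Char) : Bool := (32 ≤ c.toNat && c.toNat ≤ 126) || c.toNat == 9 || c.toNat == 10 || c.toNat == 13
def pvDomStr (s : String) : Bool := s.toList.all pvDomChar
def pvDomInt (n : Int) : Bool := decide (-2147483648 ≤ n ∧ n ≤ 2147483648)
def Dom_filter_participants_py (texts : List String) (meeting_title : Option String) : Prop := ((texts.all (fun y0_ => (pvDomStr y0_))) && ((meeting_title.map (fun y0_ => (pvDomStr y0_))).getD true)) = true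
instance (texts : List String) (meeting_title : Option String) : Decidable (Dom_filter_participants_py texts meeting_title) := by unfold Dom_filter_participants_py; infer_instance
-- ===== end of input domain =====

-- B: one-pass dedup-by-output-membership with a single-conjunction name test, then a
-- shortest-first accumulation of minimal prefix-free names; same return value (alternative algorithm).

-- ===== PORT A =====

-- A's _looks_like_name: early-return chain
def looksLikeName (text : String) (meeting_title : Option String) : Bool :=
  if (text == "") || decide (PySem.Str.len text < 2) || decide (PySem.Str.len text > 80) then false
  else if (match meeting_title with
           | some mt => (!(mt == "")) && (text == mt)
           | none => false) then false
  else if ["PM", "AM", "New", "Take notes with Gemini", "Ask Gemini"].contains text then false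
  else if PySem.Str.strIsdigit text then false
  else if PySem.Str.isIn ":" text && decide (PySem.Str.len text ≤ 8) then false
  else if !(text.toList.any PySem.Chars.isalpha) then false
  else if !(match PySem.Str.pyGet? text 0 with
            | some c => PySem.Chars.isupper c
            | none => false) then false
  else if decide (PySem.Str.len text > 50) then false
  else true

def filter_participants_py (texts : List String) (meeting_title : Option String) : List String :=
  let st := texts.foldl (fun st text =>
    if PySem.Set.contains st.1 text then st
    else if !looksLikeName text meeting_title then st
    else (PySem.Set.add st.1 text, st.2 ++ [text])) (PySem.Set.empty, [])
  let candidates := st.2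
  candidates.foldl (fun participants c =>
    if candidates.any (fun other => (!(c == other)) && PySem.Str.startswith c other) then participants
    else participants ++ [c]) []

-- ===== PORT B =====

-- B's _is_name: one boolean conjunction
def isNameB (t : String) (title : Option String) : Bool :=
  decide (2 ≤ PySem.Str.len t) && decide (PySem.Str.len t ≤ 50)
  && !(match title with
       | some mt => (!(mt == "")) && (t == mt)
       | none => false)
  && !(["PM", "AM", "New", "Take notes with Gemini", "Ask Gemini"].contains t)
  && !(PySem.Str.strIsdigit t)
  && !(PySem.Str.isIn ":" t && decide (PySem.Str.len t ≤ 8))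
  && (t.toList.any PySem.Chars.isalpha)
  && (match PySem.Str.pyGet? t 0 with
      | some c => PySem.Chars.isupper c
      | none => false)

def filter_participants_py_alt (texts : List String) (meeting_title : Option String) : List String :=
  let candidates := texts.foldl (fun cand t =>
    if isNameB t meeting_title && !(cand.contains t) then cand ++ [t] else cand) []
  let minimal := (PySem.List.sorted candidates (fun s => PySem.Str.len s) false).foldl
    (fun minimal c =>
      if minimal.all (fun m => (!(PySem.Str.startswith c m)) || (m == c)) then minimal ++ [c]
      else minimal) []
  candidates.filter (fun c => PySem.Set.contains (PySem.Set.ofList minimal) c)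

-- ===== PRECONDITION & SPEC =====
def Spec_filter_participants_py (texts : List String) (meeting_title : Option String) (out : List String) : Prop := out = filter_participants_py_alt texts meeting_title
instance (texts : List String) (meeting_title : Option String) (out : List String) : Decidable (Spec_filter_participants_py texts meeting_title out) := by unfold Spec_filter_participants_py; infer_instance

-- ===== CLAIM (what is proved, stated in full; the proofs are below) =====
def Claim_equal_filter_participants_py : Prop := ∀ (texts : List String) (meeting_title : Option String), Dom_filter_participants_py texts meeting_title → Spec_filter_participants_py texts meeting_title (filter_participants_py texts meeting_title)

-- ===== LEMMAS AND PROOFS =====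

-- A's filter predicate equals B's single conjunction
theorem looks_eq (t : String) (mt : Option String) : looksLikeName t mt = isNameB t mt := by
  unfold looksLikeName isNameB
  by_cases h2 : t.length ≤ 1
  · have h2' : ¬ 2 ≤ t.length := by omega
    simp [h2, h2']
  · have hne : ¬ (t = "") := fun h => by subst h; simp at h2
    by_cases h80 : 80 < t.length
    · have h50' : ¬ t.length ≤ 50 := by omega
      simp [h2, h80, h50']
    · by_cases h50 : 50 < t.length
      · have h50' : ¬ t.length ≤ 50 := by omega
        simp [h2, h80, h50, h50', hne]
      · have h2'' : 2 ≤ t.length := by omega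
        have h50' : t.length ≤ 50 := by omega
        simp [h2, h80, h50, h2'', h50', hne]
        have halpha : (!decide (∀ x ∈ t.toList, PySem.Chars.isalpha x = false)) = t.toList.any PySem.Chars.isalpha := by
          cases hx : t.toList.any PySem.Chars.isalpha <;> simp_all [List.any_eq_true, List.any_eq_false]
        rw [halpha]
        ac_rfl

-- phase 1: A's seen-set fold and B's membership-dedup fold produce the same candidate list
theorem phase1_eq (mt : Option String) (ts : List String) : ∀ (C : List String),
    (ts.foldl (fun st text =>
      if PySem.Set.contains st.1 text then st
      else if !looksLikeName text mt then st
      else (PySem.Set.add st.1 text, st.2 ++ [text])) (C, C)).2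
    = ts.foldl (fun cand t =>
        if isNameB t mt && !(cand.contains t) then cand ++ [t] else cand) C := by
  induction ts with
  | nil => intro C; rfl
  | cons t ts ih =>
    intro C
    simp only [List.foldl_cons]
    rw [show isNameB t mt = looksLikeName t mt from (looks_eq t mt).symm]
    by_cases hc : C.contains t = true
    · have hsc : PySem.Set.contains C t = true := by simpa using hc
      simp only [hsc, hc, if_true, Bool.not_true, Bool.and_false, Bool.false_eq_true, if_false]
      exact ih C
    · have hc' : C.contains t = false := by simpa using hc
      have hsc : PySem.Set.contains C t = false := by simpa using hc'
      cases hn : looksLikeName t mt with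
      | false =>
        simp only [hsc, hc', Bool.false_eq_true, if_false, Bool.not_false, if_true,
          Bool.false_and, Bool.false_eq_true, if_false]
        exact ih C
      | true =>
        have hadd : PySem.Set.add C t = C ++ [t] := by
          have hmem : t ∉ C := by simpa using hc'
          simp [PySem.Set.add, hmem]
        simp only [hsc, hc', Bool.false_eq_true, if_false, Bool.not_true,
          Bool.not_false, Bool.and_true, if_true, hadd]
        exact ih (C ++ [t])

-- the drop condition of A's second loop: some other candidate is a proper prefix of c
def badIn (L : List String) (c : String) : Bool :=
  L.any (fun other => (!(c == other)) && PySem.Str.startswith c other)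

theorem badIn_iff (L : List String) (c : String) :
    badIn L c = true ↔ ∃ o ∈ L, c ≠ o ∧ o.toList <+: c.toList := by
  simp [badIn, List.any_eq_true, Bool.and_eq_true, beq_eq_false_iff_ne,
        PySem.Str.startswith_eq, PySem.Chars.startswith_iff]

theorem proper_prefix_length_lt {p o : String} (hne : o ≠ p) (hpfx : p.toList <+: o.toList) :
    p.toList.length < o.toList.length := by
  rcases Nat.lt_or_ge p.toList.length o.toList.length with h | h
  · exact h
  · exfalso
    have : p.toList = o.toList := hpfx.eq_of_length (le_antisymm hpfx.length_le h)
    exact hne (String.toList_inj.mp this).symm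

theorem exists_min_prefix : ∀ (n : Nat) (L : List String) (c o : String),
    o.toList.length ≤ n → o ∈ L → c ≠ o → o.toList <+: c.toList →
    ∃ m, m ∈ L ∧ c ≠ m ∧ m.toList <+: c.toList ∧ badIn L m = false := by
  intro n
  induction n with
  | zero =>
    intro L c o hlen ho hne hpfx
    cases hbad : badIn L o with
    | false => exact ⟨o, ho, hne, hpfx, hbad⟩
    | true =>
      obtain ⟨p, hp, hop, hppfx⟩ := (badIn_iff L o).mp hbad
      have := proper_prefix_length_lt hop hppfx
      omega
  | succ n ih =>
    intro L c o hlen ho hne hpfx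
    cases hbad : badIn L o with
    | false => exact ⟨o, ho, hne, hpfx, hbad⟩
    | true =>
      obtain ⟨p, hp, hop, hppfx⟩ := (badIn_iff L o).mp hbad
      have hlt := proper_prefix_length_lt hop hppfx
      have hcp : c ≠ p := by
        intro h; subst h
        have : o.toList = c.toList := hpfx.eq_of_length (le_antisymm hpfx.length_le hppfx.length_le)
        exact hne (String.toList_inj.mp this).symm
      exact ih L c p (by omega) hp hcp (hppfx.trans hpfx)

-- B's shortest-first accumulating pass computes exactly the badIn-free candidates
theorem fold_kept (L : List String) :
    ∀ (S2 S1 : List String),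
      S1 ++ S2 = PySem.List.sorted L (fun s => PySem.Str.len s) false →
      S2.foldl (fun minimal c =>
        if minimal.all (fun m => (!(PySem.Str.startswith c m)) || (m == c)) then minimal ++ [c]
        else minimal) (S1.filter (fun c => !badIn L c))
      = (S1 ++ S2).filter (fun c => !badIn L c) := by
  intro S2
  induction S2 with
  | nil => intro S1 h; simp
  | cons c S2' ih =>
    intro S1 hS
    have hperm : (S1 ++ c :: S2').Perm L := by
      rw [hS]; exact PySem.List.sorted_perm L _ false
    have hpair : (S1 ++ c :: S2').Pairwise (fun a b => PySem.Str.len a ≤ PySem.Str.len b) := by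
      rw [hS]; exact PySem.List.sorted_pairwise L (fun s => PySem.Str.len s)
    have hkey : (S1.filter (fun x => !badIn L x)).all
        (fun m => (!(PySem.Str.startswith c m)) || (m == c)) = !badIn L c := by
      cases hbad : badIn L c with
      | true =>
        obtain ⟨o, hoL, hco, hpfx⟩ := (badIn_iff L c).mp hbad
        obtain ⟨m, hmL, hcm, hmpfx, hmgood⟩ :=
          exists_min_prefix o.toList.length L c o le_rfl hoL hco hpfx
        have hmlt := proper_prefix_length_lt hcm hmpfx
        have hmS : m ∈ S1 ++ c :: S2' := hperm.mem_iff.mpr hmL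
        have hmS1 : m ∈ S1 := by
          rcases List.mem_append.mp hmS with h | h
          · exact h
          · rcases List.mem_cons.mp h with h' | h'
            · exact absurd h'.symm hcm
            · exfalso
              have hp2 := (List.pairwise_append.mp hpair).2.1
              have hcle := (List.pairwise_cons.mp hp2).1 m h'
              simp only [PySem.Str.len_eq] at hcle
              omega
        apply List.all_eq_false.mpr
        refine ⟨m, List.mem_filter.mpr ⟨hmS1, by simp [hmgood]⟩, ?_⟩
        have hsw : PySem.Str.startswith c m = true := by
          simp only [PySem.Str.startswith_eq]
          exact (PySem.Chars.startswith_iff _ _).mpr hmpfx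
        intro hcontra
        simp only [Bool.or_eq_true, Bool.not_eq_true', beq_iff_eq] at hcontra
        rcases hcontra with h | h
        · rw [hsw] at h; cases h
        · exact hcm h.symm
      | false =>
        apply List.all_eq_true.mpr
        intro m hm
        have hmS1 : m ∈ S1 := (List.mem_filter.mp hm).1
        have hmL : m ∈ L := hperm.mem_iff.mp (List.mem_append_left _ hmS1)
        simp only [Bool.or_eq_true, Bool.not_eq_true', beq_iff_eq,
                   PySem.Str.startswith_eq]
        by_cases hsw : PySem.Chars.startswith c.toList m.toList = true
        · right
          have hpfx := (PySem.Chars.startswith_iff _ _).mp hsw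
          by_contra hmc
          have : badIn L c = true := (badIn_iff L c).mpr ⟨m, hmL, fun h => hmc h.symm, hpfx⟩
          rw [this] at hbad; cases hbad
        · left; simpa using hsw
    simp only [List.foldl_cons]
    have hacc : (if (S1.filter (fun x => !badIn L x)).all
          (fun m => (!(PySem.Str.startswith c m)) || (m == c)) = true
        then S1.filter (fun x => !badIn L x) ++ [c]
        else S1.filter (fun x => !badIn L x))
        = (S1 ++ [c]).filter (fun x => !badIn L x) := by
      rw [hkey]
      cases hbad : badIn L c with
      | true => simp [List.filter_append, hbad]
      | false => simp [List.filter_append, hbad]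
    rw [hacc]
    have hS' : (S1 ++ [c]) ++ S2' = PySem.List.sorted L (fun s => PySem.Str.len s) false := by
      simpa [List.append_assoc] using hS
    have := ih (S1 ++ [c]) hS'
    simpa [List.append_assoc] using this

-- A's second loop equals a filter by badIn
theorem A_eq_filter (L : List String) :
    L.foldl (fun participants c =>
      if L.any (fun other => (!(c == other)) && PySem.Str.startswith c other) then participants
      else participants ++ [c]) []
    = L.filter (fun c => !badIn L c) := by
  have hfun : (fun (participants : List String) c =>
      if L.any (fun other => (!(c == other)) && PySem.Str.startswith c other) = true then participants
      else participants ++ [c])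
      = (fun (participants : List String) c =>
        if (!badIn L c) = true then participants ++ [c] else participants) := by
    funext acc c
    rw [show (L.any fun other => (!(c == other)) && PySem.Str.startswith c other) = badIn L c from rfl]
    cases badIn L c <;> simp
  rw [hfun]
  exact (PySem.List.foldl_append_if_eq_filter (fun c => !badIn L c) L []).trans (by simp)

-- ===== VERDICT (by name: the statement is the Claim_ definition above) =====
theorem filter_participants_py_spec : Claim_equal_filter_participants_py := by
  unfold Claim_equal_filter_participants_py
  intro texts mt _
  unfold Spec_filter_participants_py filter_participants_py filter_participants_py_alt
  dsimp only
  have hph1 : (texts.foldl (fun st text =>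
      if PySem.Set.contains st.1 text then st
      else if !looksLikeName text mt then st
      else (PySem.Set.add st.1 text, st.2 ++ [text])) (PySem.Set.empty, [])).2
      = texts.foldl (fun cand t =>
          if isNameB t mt && !(cand.contains t) then cand ++ [t] else cand) [] := by
    simpa [PySem.Set.empty] using phase1_eq mt texts []
  rw [hph1]
  set L := texts.foldl (fun cand t =>
      if isNameB t mt && !(cand.contains t) then cand ++ [t] else cand) [] with hL
  rw [A_eq_filter L]
  have hkept := fold_kept L (PySem.List.sorted L (fun s => PySem.Str.len s) false) [] (by simp)
  simp only [List.nil_append, List.filter_nil] at hkept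
  rw [hkept]
  symm
  apply List.filter_congr
  intro c hc
  have hiff : PySem.Set.contains
      (PySem.Set.ofList ((PySem.List.sorted L (fun s => PySem.Str.len s) false).filter
        (fun x => !badIn L x))) c = true ↔ badIn L c = false := by
    rw [PySem.Set.contains_iff, PySem.Set.mem_ofList, List.mem_filter]
    simp [hc]
  cases hbad : badIn L c with
  | false => simpa [hbad] using hiff.mpr hbad
  | true =>
    simp only [Bool.not_true]
    cases hcon : PySem.Set.contains
        (PySem.Set.ofList ((PySem.List.sorted L (fun s => PySem.Str.len s) false).filter
          (fun x => !badIn L x))) c with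
    | false => rfl
    | true => rw [hiff.mp hcon] at hbad; cases hbad
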